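-- pv_equiv track=rewrite | github.com/Jarvisgigantis/Sudoku-Solver | Sudoku_Solver Cleaned up.py | check_distinct_list
-- ===== SOURCE A (Python) =====
-- def check_distinct_list(Segment:list[int]) -> bool:
--     """
--     This function is supposed to take a list and outputs true if no numbers repeat or is no higher than 9. Otherwise output False. 0 is ignored.
--     """
--     used = []
--     for i in Segment:
--         if i == 0:
--             continue
--         if i > 9:
--             return False
--         if i in used:
--             return False
--         used.append(i)
--     return True
-- ===== SOURCE B (Python) =====
-- def check_distinct_list(Segment: list[int]) -> bool:
--     """
--     True iff no nonzero value exceeds 9 and no nonzero value repeats.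
--     """
--     nonzero = [x for x in Segment if x != 0]
--     return all(x <= 9 for x in nonzero) and len(set(nonzero)) == len(nonzero)
-- ===== Notes on version B (the rewrite author's own statement) =====
-- stated objective: simpler
-- what changed: Replaced the incremental scan with early returns and a growing 'used' list by a filter of the nonzero values followed by two aggregate checks: a bound check and a set-length uniqueness test.
import Mathlib
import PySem

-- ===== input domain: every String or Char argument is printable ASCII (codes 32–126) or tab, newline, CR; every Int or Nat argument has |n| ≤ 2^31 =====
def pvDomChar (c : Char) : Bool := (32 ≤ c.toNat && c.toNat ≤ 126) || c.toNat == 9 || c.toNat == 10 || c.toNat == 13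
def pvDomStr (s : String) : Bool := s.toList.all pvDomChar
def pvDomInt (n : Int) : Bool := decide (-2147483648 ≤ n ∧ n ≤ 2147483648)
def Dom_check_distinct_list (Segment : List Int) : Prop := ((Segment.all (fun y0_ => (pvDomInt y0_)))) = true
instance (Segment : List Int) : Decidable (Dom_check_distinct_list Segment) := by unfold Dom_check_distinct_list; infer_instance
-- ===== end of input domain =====

-- B replaces A's incremental early-return scan with a 'used' list by a nonzero filter
-- plus two aggregate checks (bound check, set-length uniqueness); objective: simpler.


-- ===== PORT A =====
-- the loop over Segment carrying the 'used' accumulator, branches in A's order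
def checkLoopA (used : List Int) (xs : List Int) : Bool :=
  match xs with
  | [] => true
  | i :: rest =>
    if i == 0 then checkLoopA used rest
    else if i > 9 then false
    else if used.contains i then false
    else checkLoopA (used ++ [i]) rest

def check_distinct_list (Segment : List Int) : Bool :=
  checkLoopA [] Segment

-- ===== PORT B =====
def check_distinct_list_alt (Segment : List Int) : Bool :=
  let nonzero := Segment.filter (fun x => x != 0)
  nonzero.all (fun x => x ≤ 9) && ((PySem.Set.ofList nonzero : List Int).length == nonzero.length)

-- ===== PRECONDITION & SPEC =====
def Spec_check_distinct_list (Segment : List Int) (out : Bool) : Prop := out = check_distinct_list_alt Segment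
instance (Segment : List Int) (out : Bool) : Decidable (Spec_check_distinct_list Segment out) := by unfold Spec_check_distinct_list; infer_instance

-- ===== CLAIM (what is proved, stated in full; the proofs are below) =====
def Claim_equal_check_distinct_list : Prop := ∀ (Segment : List Int), Dom_check_distinct_list Segment → Spec_check_distinct_list Segment (check_distinct_list Segment)

-- ===== LEMMAS AND PROOFS =====

-- A's loop succeeds iff the nonzero values are all ≤ 9, pairwise distinct, and avoid 'used'
theorem checkLoopA_eq_true (xs : List Int) : ∀ (used : List Int),
    (checkLoopA used xs = true ↔
      ((∀ i ∈ xs, i ≠ 0 → i ≤ 9) ∧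
       (xs.filter (fun x => x != 0)).Nodup ∧
       (∀ i ∈ xs, i ≠ 0 → i ∉ used))) := by
  induction xs with
  | nil => intro used; simp [checkLoopA]
  | cons x rest ih =>
    intro used
    rw [checkLoopA]
    by_cases hx0 : x = 0
    · subst hx0
      simp only [BEq.rfl, if_true]
      rw [ih used]
      simp
    · by_cases hx9 : x > 9
      · rw [if_neg (by simpa using hx0), if_pos (by simpa using hx9)]
        constructor
        · intro h; simp at h
        · rintro ⟨h9, -, -⟩
          have := h9 x (by simp) hx0
          omega
      · by_cases hxu : x ∈ used
        · rw [if_neg (by simpa using hx0), if_neg (by simpa using hx9),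
            if_pos (by simpa using hxu)]
          constructor
          · intro h; simp at h
          · rintro ⟨-, -, hav⟩
            exact absurd hxu (hav x (by simp) hx0)
        · rw [if_neg (by simpa using hx0), if_neg (by simpa using hx9),
            if_neg (by simpa using hxu)]
          rw [ih (used ++ [x])]
          have hfc : (x :: rest).filter (fun x => x != 0)
              = x :: rest.filter (fun x => x != 0) := by simp [hx0]
          rw [hfc]
          simp only [List.forall_mem_cons, List.nodup_cons, List.mem_append,
            List.mem_singleton, not_or]
          constructor
          · rintro ⟨h9, hnd, hav⟩
            refine ⟨⟨fun _ => by omega, h9⟩, ⟨?_, hnd⟩,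
              ⟨fun _ => hxu, fun i hi hne => (hav i hi hne).1⟩⟩
            intro hmem
            have hm := List.mem_filter.mp hmem
            exact (hav x hm.1 hx0).2 rfl
          · rintro ⟨⟨-, h9⟩, ⟨hxnf, hnd⟩, -, hav⟩
            refine ⟨h9, hnd, fun i hi hne => ⟨hav i hi hne, fun he => hxnf ?_⟩⟩
            subst he
            exact List.mem_filter.mpr ⟨hi, by simpa using hne⟩

-- length of Python's set(xs) (built by foldl add) versus the source length
theorem foldl_add_length (xs : List Int) : ∀ (s : List Int),
    (xs.foldl PySem.Set.add s).length ≤ s.length + xs.length ∧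
    ((xs.foldl PySem.Set.add s).length = s.length + xs.length ↔
      xs.Nodup ∧ ∀ x ∈ xs, x ∉ s) := by
  induction xs with
  | nil => intro s; simp
  | cons x rest ih =>
    intro s
    rw [List.foldl_cons]
    simp only [List.length_cons]
    by_cases hxs : x ∈ s
    · have hadd : PySem.Set.add s x = s := by
        simp [PySem.Set.add, hxs]
      rw [hadd]
      obtain ⟨hle, -⟩ := ih s
      refine ⟨by omega, ?_, ?_⟩
      · intro h; exact absurd h (by omega)
      · rintro ⟨-, hav⟩
        exact absurd hxs (hav x (by simp))
    · have hadd : PySem.Set.add s x = s ++ [x] := by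
        simp [PySem.Set.add, hxs]
      rw [hadd]
      obtain ⟨hle, heq⟩ := ih (s ++ [x])
      simp only [List.length_append, List.length_cons, List.length_nil] at hle heq
      refine ⟨by omega, ?_⟩
      rw [show s.length + (rest.length + 1) = s.length + 1 + rest.length by omega, heq]
      simp only [List.mem_append, List.mem_singleton, not_or, List.nodup_cons,
        List.forall_mem_cons]
      constructor
      · rintro ⟨hnd, hav⟩
        exact ⟨⟨fun hm => (hav x hm).2 rfl, hnd⟩, hxs, fun y hy => (hav y hy).1⟩
      · rintro ⟨⟨hxr, hnd⟩, -, hav⟩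
        exact ⟨hnd, fun y hy => ⟨hav y hy, fun he => hxr (he ▸ hy)⟩⟩

theorem ofList_length_eq_iff (xs : List Int) :
    ((PySem.Set.ofList xs : List Int).length = xs.length ↔ xs.Nodup) := by
  have h := (foldl_add_length xs []).2
  simpa [PySem.Set.ofList] using h

-- ===== VERDICT (by name: the statement is the Claim_ definition above) =====
theorem check_distinct_list_spec : Claim_equal_check_distinct_list := by
  intro Segment _
  unfold Spec_check_distinct_list check_distinct_list check_distinct_list_alt
  rw [Bool.eq_iff_iff, checkLoopA_eq_true Segment []]
  simp only [Bool.and_eq_true, List.all_eq_true, beq_iff_eq,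
    ofList_length_eq_iff, List.mem_filter, bne_iff_ne, decide_eq_true_eq,
    List.not_mem_nil, not_false_iff, implies_true, and_true]
  tauto
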